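-- pv_equiv track=rewrite | github.com/silvernuke911/Random-programs | longestword.py | has_badletters
-- ===== SOURCE A (Python) =====
-- badletters=list('kmqvwxzKMQVWXZ')
--
-- def has_badletters(testword):
--     x=0
--     for char in badletters:
--         if char in testword:
--             x+=1
--     if x==0:
--         return False
--     else:
--         return True
-- ===== SOURCE B (Python) =====
-- def has_badletters(testword):
--     return bool(set(testword) & set('kmqvwxzKMQVWXZ'))
-- ===== Notes on version B (the rewrite author's own statement) =====
-- stated objective: idiomatic
-- what changed: Instead of looping over the 13 forbidden letters and doing a substring scan of the word for each while keeping a running count, B builds the set of the word's characters once and returns whether its intersection with the forbidden-letter set is non-empty (single traversal of the word).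
import Mathlib
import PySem

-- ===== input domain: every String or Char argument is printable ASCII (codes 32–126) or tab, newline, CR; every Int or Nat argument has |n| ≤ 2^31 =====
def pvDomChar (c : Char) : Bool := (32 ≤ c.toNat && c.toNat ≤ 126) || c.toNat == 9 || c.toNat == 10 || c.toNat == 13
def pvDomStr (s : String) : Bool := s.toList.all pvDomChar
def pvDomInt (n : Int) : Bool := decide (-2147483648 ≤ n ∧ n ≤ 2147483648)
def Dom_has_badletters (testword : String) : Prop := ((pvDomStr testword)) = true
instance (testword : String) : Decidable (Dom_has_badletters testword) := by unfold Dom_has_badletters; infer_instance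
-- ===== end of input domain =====

-- B replaces the count-over-forbidden-letters loop by a single set intersection of the word's character set with the forbidden set (idiomatic).


-- ===== PORT A =====
def pvBadletters : List Char := "kmqvwxzKMQVWXZ".toList

def has_badletters (testword : String) : Bool :=
  let x : Int := pvBadletters.foldl
    (fun x char => if testword.toList.contains char then x + 1 else x) 0
  if x == 0 then false else true

-- ===== PORT B =====
def has_badletters_alt (testword : String) : Bool :=
  !(PySem.Set.inter (PySem.Set.ofList testword.toList)
      (PySem.Set.ofList "kmqvwxzKMQVWXZ".toList)).isEmpty

-- ===== PRECONDITION & SPEC =====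
def Spec_has_badletters (testword : String) (out : Bool) : Prop := out = has_badletters_alt testword
instance (testword : String) (out : Bool) : Decidable (Spec_has_badletters testword out) := by unfold Spec_has_badletters; infer_instance

-- ===== CLAIM (what is proved, stated in full; the proofs are below) =====
def Claim_equal_has_badletters : Prop := ∀ (testword : String), Dom_has_badletters testword → Spec_has_badletters testword (has_badletters testword)

-- ===== LEMMAS AND PROOFS =====
theorem pv_foldl_count {α : Type} (p : α → Bool) :
    ∀ (L : List α) (n : Int),
      L.foldl (fun x c => if p c then x + 1 else x) n = n + (L.countP p : Int) := by
  intro L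
  induction L with
  | nil => intro n; simp
  | cons a t ih =>
    intro n
    simp only [List.foldl_cons, List.countP_cons]
    by_cases h : p a
    · simp [h, ih]; ring
    · simp [h, ih]

-- ===== VERDICT (by name: the statement is the Claim_ definition above) =====
theorem has_badletters_spec : Claim_equal_has_badletters := by
  intro w _
  unfold Spec_has_badletters has_badletters has_badletters_alt
  simp only [pv_foldl_count, Int.zero_add]
  rw [show (PySem.Set.ofList "kmqvwxzKMQVWXZ".toList : List Char)
        = PySem.Set.ofList pvBadletters from rfl]
  by_cases hex : ∃ b ∈ pvBadletters, b ∈ w.toList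
  · obtain ⟨b, hb, hbw⟩ := hex
    have h1 : 0 < pvBadletters.countP (fun char => w.toList.contains char) :=
      List.countP_pos_iff.mpr ⟨b, hb, by simpa using hbw⟩
    have h2 : b ∈ PySem.Set.inter (PySem.Set.ofList w.toList) (PySem.Set.ofList pvBadletters) :=
      (PySem.Set.mem_inter _ _ _).mpr
        ⟨(PySem.Set.mem_ofList _ _).mpr hbw, (PySem.Set.mem_ofList _ _).mpr hb⟩
    have h3 : (PySem.Set.inter (PySem.Set.ofList w.toList)
        (PySem.Set.ofList pvBadletters)).isEmpty = false := by
      rw [List.isEmpty_eq_false_iff_exists_mem]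
      exact ⟨b, h2⟩
    have h4 : ((pvBadletters.countP (fun char => w.toList.contains char) : Nat) : Int) ≠ 0 := by
      exact_mod_cast h1.ne'
    simp [h3]
    exact ⟨b, hb, hbw⟩
  · have h1 : pvBadletters.countP (fun char => w.toList.contains char) = 0 :=
      List.countP_eq_zero.mpr (fun a ha => by
        have hnm : a ∉ w.toList := fun h => hex ⟨a, ha, h⟩
        simpa using hnm)
    have h2 : PySem.Set.inter (PySem.Set.ofList w.toList)
        (PySem.Set.ofList pvBadletters) = [] := by
      rw [List.eq_nil_iff_forall_not_mem]
      intro a ha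
      have hm := (PySem.Set.mem_inter _ _ _).mp ha
      exact hex ⟨a, (PySem.Set.mem_ofList _ _).mp hm.2, (PySem.Set.mem_ofList _ _).mp hm.1⟩
    simp [h1, h2]
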